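-- pv_equiv track=rewrite | github.com/Ag3497120/verantyx-v6 | synth_results/46f33fce.py | transform
-- ===== SOURCE A (Python) =====
-- def transform(grid):
--     rows = len(grid)
--     cols = len(grid[0])
--
--     # Each non-zero cell at (r,c) [r,c odd] maps to a 4x4 block in the output
--     # Output size = input_size * 2 (20x20 for 10x10 input)
--     out_rows = rows * 2
--     out_cols = cols * 2
--     result = [[0]*out_cols for _ in range(out_rows)]
--
--     for r in range(rows):
--         for c in range(cols):
--             if grid[r][c] != 0:
--                 v = grid[r][c]
--                 # Map to super-cell
--                 sr = r // 2
--                 sc = c // 2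
--                 # Fill 4x4 block
--                 for dr in range(4):
--                     for dc in range(4):
--                         rr = sr * 4 + dr
--                         cc = sc * 4 + dc
--                         if rr < out_rows and cc < out_cols:
--                             result[rr][cc] = v
--
--     return result
-- ===== SOURCE B (Python) =====
-- def transform(grid):
--     rows = len(grid)
--     cols = len(grid[0])
--     srows = (rows + 1) // 2
--     scols = (cols + 1) // 2
--
--     def block_last(sr, sc):
--         # last nonzero value in the super-cell's up-to-four input cells, row-major
--         v = 0
--         for r in (2 * sr, 2 * sr + 1):
--             if r < rows:
--                 for c in (2 * sc, 2 * sc + 1):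
--                     if c < cols:
--                         x = grid[r][c]
--                         if x != 0:
--                             v = x
--         return v
--
--     sup = [[block_last(sr, sc) for sc in range(scols)] for sr in range(srows)]
--     return [[sup[rr // 4][cc // 4] for cc in range(cols * 2)] for rr in range(rows * 2)]
-- ===== Notes on version B (the rewrite author's own statement) =====
-- stated objective: faster
-- what changed: Replaces the overlapping 4x4 scatter writes (16 output writes per nonzero input cell, last write wins) with a reduce-then-expand pass: a super-grid stores the last nonzero of each 2x2 input block, then every output cell is gathered exactly once from its super-cell.
import Mathlib
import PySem

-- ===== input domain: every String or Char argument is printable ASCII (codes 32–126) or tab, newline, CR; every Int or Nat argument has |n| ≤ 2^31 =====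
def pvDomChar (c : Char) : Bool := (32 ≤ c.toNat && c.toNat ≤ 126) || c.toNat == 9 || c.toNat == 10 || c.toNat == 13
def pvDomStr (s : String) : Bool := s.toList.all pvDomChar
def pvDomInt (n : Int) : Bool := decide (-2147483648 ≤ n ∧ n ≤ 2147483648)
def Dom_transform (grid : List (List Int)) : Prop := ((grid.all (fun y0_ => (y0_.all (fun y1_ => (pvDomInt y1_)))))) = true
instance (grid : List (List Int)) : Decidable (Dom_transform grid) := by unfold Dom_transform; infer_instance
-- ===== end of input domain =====

-- B replaces A's overlapping per-nonzero-cell 4x4 scatter writes with a reduce-then-expand pass: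
-- a super-grid of last-nonzero 2x2 block values, then one gather per output cell (measurably faster by a constant factor).


-- ===== PORT A =====
-- grid[r][c] read (indices in range on every use under Pre_; the default is never reached there)
def pvGet2 (g : List (List Int)) (i j : Nat) : Int := (g.getD i []).getD j 0
-- result[i][j] = v (the caller's guard keeps the indices in range, as in the Python)
def pvSet2 (m : List (List Int)) (i j : Nat) (v : Int) : List (List Int) :=
  m.modify i (fun row => row.set j v)

-- the inner 'for dr in range(4): for dc in range(4): …' block write
def writeA (outR outC : Nat) (v : Int) (sr sc : Nat) (result : List (List Int)) : List (List Int) :=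
  (List.range 4).foldl (fun result dr =>
    (List.range 4).foldl (fun result dc =>
      if sr * 4 + dr < outR ∧ sc * 4 + dc < outC then pvSet2 result (sr * 4 + dr) (sc * 4 + dc) v
      else result) result) result

-- the body of the 'for c in range(cols)' loop
def cellA (grid : List (List Int)) (outR outC : Nat) (result : List (List Int)) (r c : Nat) :
    List (List Int) :=
  if pvGet2 grid r c ≠ 0 then writeA outR outC (pvGet2 grid r c) (r / 2) (c / 2) result else result

def transform (grid : List (List Int)) : List (List Int) :=
  let rows := grid.length
  let cols := grid.headI.length
  (List.range rows).foldl (fun result r =>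
      (List.range cols).foldl (fun result c => cellA grid (rows * 2) (cols * 2) result r c) result)
    (List.replicate (rows * 2) (List.replicate (cols * 2) (0 : Int)))

-- ===== PORT B =====
-- last nonzero value among the super-cell's up-to-four input cells, row-major
def blockLast (grid : List (List Int)) (rows cols sr sc : Nat) : Int :=
  [2 * sr, 2 * sr + 1].foldl (fun v r =>
    if r < rows then
      [2 * sc, 2 * sc + 1].foldl (fun v c =>
        if c < cols then (if pvGet2 grid r c ≠ 0 then pvGet2 grid r c else v) else v) v
    else v) 0

def transform_alt (grid : List (List Int)) : List (List Int) :=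
  let rows := grid.length
  let cols := grid.headI.length
  let sup := (List.range ((rows + 1) / 2)).map (fun sr =>
    (List.range ((cols + 1) / 2)).map (fun sc => blockLast grid rows cols sr sc))
  (List.range (rows * 2)).map (fun rr =>
    (List.range (cols * 2)).map (fun cc => pvGet2 sup (rr / 4) (cc / 4)))

-- ===== PRECONDITION & SPEC =====
-- Pre_ excludes exactly the inputs on which the Python A raises IndexError: the empty grid
-- (grid[0]) and ragged grids with some row shorter than the first (grid[r][c], c < len(grid[0])).
def Pre_transform (grid : List (List Int)) : Prop :=
  grid ≠ [] ∧ ∀ row ∈ grid, grid.headI.length ≤ row.length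
instance (grid : List (List Int)) : Decidable (Pre_transform grid) := by unfold Pre_transform; infer_instance

def pvWitness_transform : List (List Int) := [[1, 0], [0, 2]]

def Spec_transform (grid : List (List Int)) (out : List (List Int)) : Prop := out = transform_alt grid
instance (grid : List (List Int)) (out : List (List Int)) : Decidable (Spec_transform grid out) := by unfold Spec_transform; infer_instance

-- ===== CLAIM (what is proved, stated in full; the proofs are below) =====
def Claim_equal_transform : Prop := ∀ (grid : List (List Int)), Dom_transform grid → Pre_transform grid → Spec_transform grid (transform grid)

-- ===== LEMMAS AND PROOFS =====

-- shape: R rows, each of length C (stated via getD for pointwise reasoning)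
def shapeRC (m : List (List Int)) (R C : Nat) : Prop :=
  m.length = R ∧ ∀ k, k < R → (m.getD k []).length = C

theorem shapeRC_replicate (R C : Nat) :
    shapeRC (List.replicate R (List.replicate C (0 : Int))) R C := by
  refine ⟨by simp, fun k hk => ?_⟩
  rw [List.getD_eq_getElem?_getD, List.getElem?_replicate]
  simp [hk]

theorem getD_modify (m : List (List Int)) (f : List Int → List Int) (i k : Nat) :
    (m.modify i f).getD k [] =
      if i = k ∧ k < m.length then f (m.getD k []) else m.getD k [] := by
  rw [List.getD_eq_getElem?_getD, List.getElem?_modify, List.getD_eq_getElem?_getD]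
  by_cases hik : i = k
  · subst hik
    by_cases hk : i < m.length
    · simp [hk]
    · rw [List.getElem?_eq_none (by omega)]
      simp [hk]
  · simp [hik]

theorem getD_set (row : List Int) (j j' : Nat) (v : Int) :
    (row.set j v).getD j' 0 = if j = j' ∧ j < row.length then v else row.getD j' 0 := by
  rw [List.getD_eq_getElem?_getD, List.getElem?_set, List.getD_eq_getElem?_getD]
  by_cases hjj : j = j'
  · subst hjj
    by_cases hj : j < row.length
    · simp [hj]
    · rw [List.getElem?_eq_none (by omega)]
      simp [hj]
  · simp [hjj]

theorem shapeRC_set2 {m : List (List Int)} {R C i j : Nat} {v : Int}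
    (h : shapeRC m R C) : shapeRC (pvSet2 m i j v) R C := by
  obtain ⟨h1, h2⟩ := h
  refine ⟨by simp [pvSet2, h1], fun k hk => ?_⟩
  rw [pvSet2, getD_modify]
  split
  · rw [List.length_set]; exact h2 k hk
  · exact h2 k hk

theorem get2_set2 {m : List (List Int)} {R C i j : Nat} {v : Int}
    (h : shapeRC m R C) (hi : i < R) (hj : j < C) (i' j' : Nat) :
    pvGet2 (pvSet2 m i j v) i' j' = if i = i' ∧ j = j' then v else pvGet2 m i' j' := by
  obtain ⟨h1, h2⟩ := h
  unfold pvGet2 pvSet2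
  rw [getD_modify]
  by_cases hii : i = i'
  · subst hii
    have hlt : i < m.length := by omega
    have hrl : (m.getD i []).length = C := h2 i hi
    rw [if_pos ⟨rfl, hlt⟩, getD_set]
    by_cases hjj : j = j'
    · rw [if_pos ⟨hjj, by rw [hrl]; exact hj⟩, if_pos ⟨rfl, hjj⟩]
    · rw [if_neg (fun hc => hjj hc.1), if_neg (fun hc => hjj hc.2)]
  · simp [hii]

-- a single guarded write, as it appears in writeA
def wcell (outR outC : Nat) (v : Int) (m : List (List Int)) (i j : Nat) : List (List Int) :=
  if i < outR ∧ j < outC then pvSet2 m i j v else m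

theorem shapeRC_wcell {m : List (List Int)} {R C i j : Nat} {v : Int}
    (h : shapeRC m R C) : shapeRC (wcell R C v m i j) R C := by
  unfold wcell; split
  · next hg => exact shapeRC_set2 h
  · exact h

theorem get2_wcell {m : List (List Int)} {R C i j rr cc : Nat} {v : Int}
    (h : shapeRC m R C) (hrr : rr < R) (hcc : cc < C) :
    pvGet2 (wcell R C v m i j) rr cc = if i = rr ∧ j = cc then v else pvGet2 m rr cc := by
  unfold wcell
  split
  · next hg => exact get2_set2 h hg.1 hg.2 rr cc
  · next hg =>
    split
    · next he => exact absurd ⟨he.1 ▸ hrr, he.2 ▸ hcc⟩ hg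
    · rfl

-- nested foldl over two lists = foldl over the pair list
theorem foldl_foldl {γ : Type} (f : γ → Nat → Nat → γ) (xs ys : List Nat) (b : γ) :
    xs.foldl (fun b x => ys.foldl (fun b y => f b x y) b) b
      = ((xs.flatMap fun x => ys.map fun y => (x, y)).foldl (fun b p => f b p.1 p.2) b) := by
  induction xs generalizing b with
  | nil => rfl
  | cons x xs ih => simp [List.foldl_append, List.foldl_map, ih]

theorem get2_fold_wcell {R C : Nat} {v : Int} (g : Nat × Nat → Nat × Nat)
    (L : List (Nat × Nat)) (m : List (List Int))
    (h : shapeRC m R C) (rr cc : Nat) (hrr : rr < R) (hcc : cc < C) :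
    pvGet2 (L.foldl (fun m p => wcell R C v m (g p).1 (g p).2) m) rr cc
      = if ∃ p ∈ L, (g p).1 = rr ∧ (g p).2 = cc then v else pvGet2 m rr cc := by
  induction L generalizing m with
  | nil => simp
  | cons p L ih =>
    rw [List.foldl_cons, ih _ (shapeRC_wcell h), get2_wcell h hrr hcc]
    by_cases h1 : ∃ q ∈ L, (g q).1 = rr ∧ (g q).2 = cc
    · simp [h1]
    · by_cases h2 : (g p).1 = rr ∧ (g p).2 = cc <;> simp [h1, h2]

theorem shapeRC_fold_wcell {R C : Nat} {v : Int} (g : Nat × Nat → Nat × Nat)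
    (L : List (Nat × Nat)) (m : List (List Int)) (h : shapeRC m R C) :
    shapeRC (L.foldl (fun m p => wcell R C v m (g p).1 (g p).2) m) R C := by
  induction L generalizing m with
  | nil => exact h
  | cons p L ih => exact ih _ (shapeRC_wcell h)

theorem writeA_eq_fold (outR outC : Nat) (v : Int) (sr sc : Nat) (m : List (List Int)) :
    writeA outR outC v sr sc m
      = (((List.range 4).flatMap fun dr => (List.range 4).map fun dc => (dr, dc)).foldl
          (fun m p => wcell outR outC v m (sr * 4 + p.1) (sc * 4 + p.2)) m) := by
  unfold writeA
  exact foldl_foldl (fun m dr dc => wcell outR outC v m (sr * 4 + dr) (sc * 4 + dc)) _ _ m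

theorem shapeRC_writeA {m : List (List Int)} {R C sr sc : Nat} {v : Int}
    (h : shapeRC m R C) : shapeRC (writeA R C v sr sc m) R C := by
  rw [writeA_eq_fold]
  exact shapeRC_fold_wcell (fun p => (sr * 4 + p.1, sc * 4 + p.2)) _ _ h

theorem get2_writeA {m : List (List Int)} {rows cols sr sc rr cc : Nat} {v : Int}
    (h : shapeRC m (rows * 2) (cols * 2)) (hrr : rr < rows * 2) (hcc : cc < cols * 2) :
    pvGet2 (writeA (rows * 2) (cols * 2) v sr sc m) rr cc
      = if sr = rr / 4 ∧ sc = cc / 4 then v else pvGet2 m rr cc := by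
  rw [writeA_eq_fold,
    get2_fold_wcell (fun p => (sr * 4 + p.1, sc * 4 + p.2)) _ m h rr cc hrr hcc]
  congr 1
  simp only [List.mem_flatMap, List.mem_map, List.mem_range, eq_iff_iff]
  constructor
  · rintro ⟨p, ⟨dr, hdr, dc, hdc, rfl⟩, h1, h2⟩
    simp only at h1 h2
    omega
  · rintro ⟨hsr, hsc⟩
    exact ⟨(rr % 4, cc % 4), ⟨rr % 4, by omega, cc % 4, by omega, rfl⟩, by simp; omega, by simp; omega⟩

theorem shapeRC_cellA {grid m : List (List Int)} {R C r c : Nat}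
    (h : shapeRC m R C) : shapeRC (cellA grid R C m r c) R C := by
  unfold cellA; split
  · exact shapeRC_writeA h
  · exact h

theorem get2_cellA {grid m : List (List Int)} {rows cols r c rr cc : Nat}
    (h : shapeRC m (rows * 2) (cols * 2)) (hrr : rr < rows * 2) (hcc : cc < cols * 2) :
    pvGet2 (cellA grid (rows * 2) (cols * 2) m r c) rr cc
      = if pvGet2 grid r c ≠ 0 ∧ r / 2 = rr / 4 ∧ c / 2 = cc / 4 then pvGet2 grid r c
        else pvGet2 m rr cc := by
  unfold cellA
  split
  · next hv =>
    rw [get2_writeA h hrr hcc]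
    by_cases hb : r / 2 = rr / 4 ∧ c / 2 = cc / 4
    · rw [if_pos hb, if_pos ⟨hv, hb.1, hb.2⟩]
    · rw [if_neg hb, if_neg (fun hc => hb ⟨hc.2.1, hc.2.2⟩)]
  · next hv =>
    rw [if_neg (fun hc => hv hc.1)]

-- the row-major list of input cells
def rowmajor (rows cols : Nat) : List (Nat × Nat) :=
  (List.range rows).flatMap fun r => (List.range cols).map fun c => (r, c)

theorem shapeRC_foldP {grid : List (List Int)} {rows cols : Nat}
    (L : List (Nat × Nat)) (m : List (List Int)) (h : shapeRC m (rows * 2) (cols * 2)) :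
    shapeRC (L.foldl (fun m p => cellA grid (rows * 2) (cols * 2) m p.1 p.2) m)
      (rows * 2) (cols * 2) := by
  induction L generalizing m with
  | nil => exact h
  | cons p L ih => exact ih _ (shapeRC_cellA h)

theorem get2_foldP {grid : List (List Int)} {rows cols rr cc : Nat}
    (L : List (Nat × Nat)) (m : List (List Int))
    (h : shapeRC m (rows * 2) (cols * 2)) (hrr : rr < rows * 2) (hcc : cc < cols * 2) :
    pvGet2 (L.foldl (fun m p => cellA grid (rows * 2) (cols * 2) m p.1 p.2) m) rr cc
      = L.foldl (fun v p =>
          if pvGet2 grid p.1 p.2 ≠ 0 ∧ p.1 / 2 = rr / 4 ∧ p.2 / 2 = cc / 4 then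
            pvGet2 grid p.1 p.2 else v) (pvGet2 m rr cc) := by
  induction L generalizing m with
  | nil => rfl
  | cons p L ih =>
    rw [List.foldl_cons, List.foldl_cons, ih _ (shapeRC_cellA h), get2_cellA h hrr hcc]

theorem transform_eq_foldP (grid : List (List Int)) :
    transform grid
      = (rowmajor grid.length grid.headI.length).foldl
          (fun m p => cellA grid (grid.length * 2) (grid.headI.length * 2) m p.1 p.2)
          (List.replicate (grid.length * 2) (List.replicate (grid.headI.length * 2) (0 : Int))) := by
  unfold transform rowmajor
  exact foldl_foldl
    (fun m r c => cellA grid (grid.length * 2) (grid.headI.length * 2) m r c) _ _ _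

theorem filter_range_div2 (n s : Nat) :
    (List.range n).filter (fun x => decide (x / 2 = s)) =
      if 2 * s + 1 < n then [2 * s, 2 * s + 1] else if 2 * s < n then [2 * s] else [] := by
  induction n with
  | zero =>
    rw [List.range_zero, List.filter_nil]
    split_ifs with h1 h2
    · exfalso; omega
    · exfalso; omega
    · rfl
  | succ n ih =>
    rw [List.range_succ, List.filter_append, ih, List.filter_cons, List.filter_nil]
    by_cases hn : n / 2 = s
    · simp only [hn, decide_true, if_true]
      have hcases : n = 2 * s ∨ n = 2 * s + 1 := by omega
      rcases hcases with hlo | hhi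
      · subst hlo
        rw [if_neg (by omega), if_neg (by omega), if_neg (by omega), if_pos (by omega)]
        rfl
      · subst hhi
        rw [if_neg (by omega), if_pos (by omega), if_pos (by omega)]
        rfl
    · simp only [hn, decide_false, Bool.false_eq_true, if_false, List.append_nil]
      split_ifs <;> first | rfl | (exfalso; omega)

theorem flatMap_if_eq_filter {α β : Type} (l : List α) (q : α → Prop) [DecidablePred q]
    (g : α → List β) :
    (l.flatMap fun x => if q x then g x else []) = (l.filter fun x => decide (q x)).flatMap g := by
  induction l with
  | nil => rfl
  | cons x l ih =>
    rw [List.flatMap_cons, List.filter_cons]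
    by_cases hx : q x <;> simp [hx, ih]

theorem fold_val_eq_blockLast (grid : List (List Int)) (rows cols sr sc : Nat)
    (h2r : 2 * sr < rows) (h2c : 2 * sc < cols) :
    (rowmajor rows cols).foldl (fun v p =>
        if pvGet2 grid p.1 p.2 ≠ 0 ∧ p.1 / 2 = sr ∧ p.2 / 2 = sc then
          pvGet2 grid p.1 p.2 else v) 0
      = blockLast grid rows cols sr sc := by
  have hfg : (fun (v : Int) (p : Nat × Nat) =>
        if pvGet2 grid p.1 p.2 ≠ 0 ∧ p.1 / 2 = sr ∧ p.2 / 2 = sc then pvGet2 grid p.1 p.2 else v)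
      = fun v p =>
        if (decide (p.1 / 2 = sr) && decide (p.2 / 2 = sc)) = true then
          (if pvGet2 grid p.1 p.2 ≠ 0 ∧ p.1 / 2 = sr ∧ p.2 / 2 = sc then pvGet2 grid p.1 p.2 else v)
        else v := by
    funext v p
    by_cases e1 : p.1 / 2 = sr <;> by_cases e2 : p.2 / 2 = sc <;> simp [e1, e2]
  rw [hfg, ← List.foldl_filter]
  unfold rowmajor
  rw [List.filter_flatMap]
  have hinner : (fun r => (((List.range cols).map fun c => (r, c)).filter
        (fun p => decide (p.1 / 2 = sr) && decide (p.2 / 2 = sc))))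
      = fun r => if r / 2 = sr then
          (((List.range cols).filter fun c => decide (c / 2 = sc)).map fun c => (r, c)) else [] := by
    funext r
    rw [List.filter_map]
    by_cases hq : r / 2 = sr
    · rw [if_pos hq]
      have hpred : ((fun p => decide (p.1 / 2 = sr) && decide (p.2 / 2 = sc)) ∘
          (fun c : Nat => (r, c))) = fun c => decide (c / 2 = sc) := by
        funext c; simp [Function.comp, hq]
      rw [hpred]
    · rw [if_neg hq]
      have hfalse : ((fun p => decide (p.1 / 2 = sr) && decide (p.2 / 2 = sc)) ∘
          (fun c : Nat => (r, c))) = fun _ => false := by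
        funext c; simp [Function.comp, hq]
      rw [hfalse]
      simp
  rw [hinner, flatMap_if_eq_filter, filter_range_div2, filter_range_div2]
  have e1 : 2 * sr / 2 = sr := by omega
  have e2 : (2 * sr + 1) / 2 = sr := by omega
  have e3 : 2 * sc / 2 = sc := by omega
  have e4 : (2 * sc + 1) / 2 = sc := by omega
  by_cases hr : 2 * sr + 1 < rows <;> by_cases hc : 2 * sc + 1 < cols <;>
    simp [blockLast, hr, hc, h2r, h2c, List.foldl, e1, e2, e3, e4]

theorem transform_point (grid : List (List Int)) (rr cc : Nat)
    (hrr : rr < grid.length * 2) (hcc : cc < grid.headI.length * 2) :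
    pvGet2 (transform grid) rr cc
      = blockLast grid grid.length grid.headI.length (rr / 4) (cc / 4) := by
  rw [transform_eq_foldP, get2_foldP _ _ (shapeRC_replicate _ _) hrr hcc]
  have h0 : pvGet2 (List.replicate (grid.length * 2)
      (List.replicate (grid.headI.length * 2) (0 : Int))) rr cc = 0 := by
    by_cases h1 : rr < grid.length * 2 <;> by_cases h2 : cc < grid.headI.length * 2 <;>
      simp [pvGet2, List.getD_eq_getElem?_getD, h1, h2]
  rw [h0]
  exact fold_val_eq_blockLast grid grid.length grid.headI.length (rr / 4) (cc / 4) (by omega) (by omega)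

theorem shapeRC_transform (grid : List (List Int)) :
    shapeRC (transform grid) (grid.length * 2) (grid.headI.length * 2) := by
  rw [transform_eq_foldP]
  exact shapeRC_foldP _ _ (shapeRC_replicate _ _)

theorem getD_map_range {α : Type} (f : Nat → α) (n i : Nat) (d : α) (h : i < n) :
    ((List.range n).map f).getD i d = f i := by
  rw [List.getD_eq_getElem _ _ (by simpa using h), List.getElem_map, List.getElem_range]

theorem get2_sup (grid : List (List Int)) (sr sc : Nat)
    (hsr : sr < (grid.length + 1) / 2) (hsc : sc < (grid.headI.length + 1) / 2) :
    pvGet2 ((List.range ((grid.length + 1) / 2)).map (fun sr =>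
        (List.range ((grid.headI.length + 1) / 2)).map (fun sc =>
          blockLast grid grid.length grid.headI.length sr sc))) sr sc
      = blockLast grid grid.length grid.headI.length sr sc := by
  unfold pvGet2
  rw [getD_map_range _ _ _ _ hsr, getD_map_range _ _ _ _ hsc]

theorem transform_alt_eq (grid : List (List Int)) : transform grid = transform_alt grid := by
  obtain ⟨hlen, hrowlen⟩ := shapeRC_transform grid
  unfold transform_alt
  apply List.ext_getElem
  · rw [hlen, List.length_map, List.length_range]
  · intro rr h1 h2
    rw [List.getElem_map]
    rw [List.getElem_range]
    have hrr : rr < grid.length * 2 := by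
      have := List.length_range (n := grid.length * 2) ▸ (List.length_map _ ▸ h2)
      omega
    apply List.ext_getElem
    · have := hrowlen rr hrr
      rw [List.getD_eq_getElem (transform grid) [] (by omega)] at this
      rw [this, List.length_map, List.length_range]
    · intro cc hc1 hc2
      have hcc : cc < grid.headI.length * 2 := by
        rw [List.length_map, List.length_range] at hc2
        exact hc2
      rw [List.getElem_map, List.getElem_range]
      have hbridge : (transform grid)[rr][cc] = pvGet2 (transform grid) rr cc := by
        unfold pvGet2
        rw [List.getD_eq_getElem (transform grid) [] (by omega),
          List.getD_eq_getElem _ 0 (by omega)]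
      rw [hbridge, transform_point grid rr cc hrr hcc]
      exact (get2_sup grid (rr / 4) (cc / 4) (by omega) (by omega)).symm

-- ===== VERDICT (by name: the statement is the Claim_ definition above) =====
theorem transform_spec : Claim_equal_transform := by
  intro grid _ _
  unfold Spec_transform
  exact transform_alt_eq grid
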